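-- pv_equiv track=rewrite | github.com/m0squit/orchestrator | preprocessor.py | _get_negative_max_or_zero_index
-- ===== SOURCE A (Python) =====
-- from typing import Dict, List, Tuple, Set, Union, Optional
--
-- def _get_negative_max_or_zero_index(array: List[int]) -> Optional[int]:
--     if len(array) == 0:
--         return None
--     i = 0
--     while array[i] > 0:
--         i += 1
--         if i == len(array):
--             return None
--     neg_max = array[i]
--     neg_max_index = i
--     while i < len(array):
--         if neg_max < array[i] <= 0:
--             neg_max = array[i]
--             neg_max_index = i
--         i += 1
--     return neg_max_index
-- ===== SOURCE B (Python) =====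
-- from typing import List, Optional
--
-- def _get_negative_max_or_zero_index(array: List[int]) -> Optional[int]:
--     non_positive = [x for x in array if x <= 0]
--     if not non_positive:
--         return None
--     return array.index(max(non_positive))
-- ===== Notes on version B (the rewrite author's own statement) =====
-- stated objective: simpler
-- what changed: Replaced the fused two-while-loop argmax scan (find first non-positive, then in-place running maximum with index bookkeeping) by a three-step decomposition: filter the non-positive values, take their max, and return its first index via list.index.
import Mathlib
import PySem

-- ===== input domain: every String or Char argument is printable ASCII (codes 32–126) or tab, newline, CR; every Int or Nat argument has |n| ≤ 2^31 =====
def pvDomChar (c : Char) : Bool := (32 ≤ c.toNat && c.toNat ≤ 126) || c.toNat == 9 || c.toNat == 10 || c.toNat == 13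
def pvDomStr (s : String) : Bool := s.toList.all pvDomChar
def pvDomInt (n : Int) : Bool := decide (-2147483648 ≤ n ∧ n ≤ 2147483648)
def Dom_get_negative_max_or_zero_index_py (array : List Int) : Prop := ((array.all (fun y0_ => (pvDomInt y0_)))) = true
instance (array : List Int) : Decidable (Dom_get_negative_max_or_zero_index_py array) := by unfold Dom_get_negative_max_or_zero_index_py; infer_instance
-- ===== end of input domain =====

-- B replaces A's fused two-while-loop argmax scan by filter / max / first-index passes (objective: simpler).

-- ===== PORT A =====
-- first while loop: 'while array[i] > 0: i += 1; if i == len(array): return None'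
-- (array[i] is always in range when read, so getD is exact here)
def pyA_find (array : List Int) (i : Nat) : Option Nat :=
  if _h : i < array.length then
    if array.getD i 0 > 0 then
      if i + 1 = array.length then none
      else pyA_find array (i + 1)
    else some i
  else none
termination_by array.length - i

-- second while loop: 'while i < len(array): if neg_max < array[i] <= 0: …; i += 1'
def pyA_scan (array : List Int) (i : Nat) (neg_max : Int) (neg_max_index : Nat) : Nat :=
  if _h : i < array.length then
    if neg_max < array.getD i 0 ∧ array.getD i 0 ≤ 0 then
      pyA_scan array (i + 1) (array.getD i 0) i
    else
      pyA_scan array (i + 1) neg_max neg_max_index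
  else neg_max_index
termination_by array.length - i

def get_negative_max_or_zero_index_py (array : List Int) : Option Int :=
  if array.length = 0 then none
  else
    match pyA_find array 0 with
    | none => none
    | some i => some ((pyA_scan array i (array.getD i 0) i : Nat) : Int)

-- ===== PORT B =====
def get_negative_max_or_zero_index_py_alt (array : List Int) : Option Int :=
  let non_positive := array.filter (fun x => x ≤ 0)
  match PySem.List.max? non_positive (fun y => y) with
  | none => none
  | some m => (PySem.List.index? array m).map (fun k => (k : Int))

-- ===== PRECONDITION & SPEC =====
def Spec_get_negative_max_or_zero_index_py (array : List Int) (out : Option Int) : Prop := out = get_negative_max_or_zero_index_py_alt array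
instance (array : List Int) (out : Option Int) : Decidable (Spec_get_negative_max_or_zero_index_py array out) := by unfold Spec_get_negative_max_or_zero_index_py; infer_instance

-- ===== CLAIM (what is proved, stated in full; the proofs are below) =====
def Claim_equal_get_negative_max_or_zero_index_py : Prop := ∀ (array : List Int), Dom_get_negative_max_or_zero_index_py array → Spec_get_negative_max_or_zero_index_py array (get_negative_max_or_zero_index_py array)

-- ===== LEMMAS AND PROOFS =====

-- r is the index both programs return: first index attaining the maximum non-positive value
def GoodIdx (array : List Int) (r : Nat) : Prop :=
  r < array.length ∧ array.getD r 0 ≤ 0 ∧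
  (∀ j, j < array.length → array.getD j 0 ≤ 0 → array.getD j 0 ≤ array.getD r 0) ∧
  (∀ j, j < r → array.getD j 0 ≠ array.getD r 0)

theorem good_unique {array : List Int} {r k : Nat}
    (hr : GoodIdx array r) (hk : GoodIdx array k) : r = k := by
  obtain ⟨hr1, hr2, hr3, hr4⟩ := hr
  obtain ⟨hk1, hk2, hk3, hk4⟩ := hk
  have hv : array.getD r 0 = array.getD k 0 :=
    le_antisymm (hk3 r hr1 hr2) (hr3 k hk1 hk2)
  rcases lt_trichotomy r k with h | h | h
  · exact absurd hv (hk4 r h)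
  · exact h
  · exact absurd hv.symm (hr4 k h)

theorem find_none (array : List Int) : ∀ n i, array.length - i ≤ n →
    pyA_find array i = none →
    ∀ j, i ≤ j → j < array.length → 0 < array.getD j 0 := by
  intro n
  induction n with
  | zero =>
    intro i hn hfind j hij hj
    rw [pyA_find] at hfind
    have : ¬ i < array.length := by omega
    omega
  | succ n ih =>
    intro i hn hfind j hij hj
    rw [pyA_find] at hfind
    by_cases h : i < array.length
    · rw [dif_pos h] at hfind
      by_cases hp : array.getD i 0 > 0
      · rw [if_pos hp] at hfind
        by_cases hend : i + 1 = array.length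
        · have hji : j = i := by omega
          rw [hji]; exact hp
        · rw [if_neg hend] at hfind
          rcases Nat.eq_or_lt_of_le hij with h' | h'
          · rw [← h']; exact hp
          · exact ih (i + 1) (by omega) hfind j (by omega) hj
      · rw [if_neg hp] at hfind
        exact absurd hfind (by simp)
    · omega

theorem find_some (array : List Int) : ∀ n i i0, array.length - i ≤ n →
    pyA_find array i = some i0 →
    i0 < array.length ∧ array.getD i0 0 ≤ 0 ∧
      ∀ j, i ≤ j → j < i0 → 0 < array.getD j 0 := by
  intro n
  induction n with
  | zero =>
    intro i i0 hn hfind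
    rw [pyA_find] at hfind
    have hni : ¬ i < array.length := by omega
    rw [dif_neg hni] at hfind
    exact absurd hfind (by simp)
  | succ n ih =>
    intro i i0 hn hfind
    rw [pyA_find] at hfind
    by_cases h : i < array.length
    · rw [dif_pos h] at hfind
      by_cases hp : array.getD i 0 > 0
      · rw [if_pos hp] at hfind
        by_cases hend : i + 1 = array.length
        · rw [if_pos hend] at hfind
          exact absurd hfind (by simp)
        · rw [if_neg hend] at hfind
          obtain ⟨h1, h2, h3⟩ := ih (i + 1) i0 (by omega) hfind
          refine ⟨h1, h2, fun j hij hji0 => ?_⟩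
          rcases Nat.eq_or_lt_of_le hij with h' | h'
          · rw [← h']; exact hp
          · exact h3 j (by omega) hji0
      · rw [if_neg hp] at hfind
        have hi0 : i0 = i := (Option.some.injEq _ _ ▸ hfind).symm
        rw [hi0]
        exact ⟨h, by omega, fun j hij hji0 => by omega⟩
    · rw [dif_neg h] at hfind
      exact absurd hfind (by simp)

theorem scan_good (array : List Int) : ∀ n i nm nmi, array.length - i ≤ n →
    nm ≤ 0 → nmi < array.length → array.getD nmi 0 = nm →
    (∀ j, j < i → j < array.length → array.getD j 0 ≤ 0 → array.getD j 0 ≤ nm) →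
    (∀ j, j < nmi → array.getD j 0 ≠ nm) →
    GoodIdx array (pyA_scan array i nm nmi) := by
  intro n
  induction n with
  | zero =>
    intro i nm nmi hn hnm hlt hval hmax hfirst
    rw [pyA_scan]
    have h : ¬ i < array.length := by omega
    rw [dif_neg h]
    exact ⟨hlt, hval ▸ hnm, fun j hj hjle => hval ▸ hmax j (by omega) hj hjle,
      fun j hj => hval ▸ hfirst j hj⟩
  | succ n ih =>
    intro i nm nmi hn hnm hlt hval hmax hfirst
    rw [pyA_scan]
    by_cases h : i < array.length
    · rw [dif_pos h]
      by_cases hc : nm < array.getD i 0 ∧ array.getD i 0 ≤ 0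
      · rw [if_pos hc]
        refine ih (i + 1) (array.getD i 0) i (by omega) hc.2 h rfl ?_ ?_
        · intro j hj hjl hjle
          rcases Nat.lt_succ_iff_lt_or_eq.mp hj with h' | h'
          · exact le_trans (hmax j h' hjl hjle) (le_of_lt hc.1)
          · subst h'; exact le_refl _
        · intro j hj
          by_cases hs : array.getD j 0 ≤ 0
          · have := hmax j hj (by omega) hs
            omega
          · omega
      · rw [if_neg hc]
        refine ih (i + 1) nm nmi (by omega) hnm hlt hval ?_ hfirst
        intro j hj hjl hjle
        rcases Nat.lt_succ_iff_lt_or_eq.mp hj with h' | h'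
        · exact hmax j h' hjl hjle
        · subst h'
          by_cases hcl : nm < array.getD j 0
          · exact absurd ⟨hcl, hjle⟩ hc
          · omega
    · rw [dif_neg h]
      exact ⟨hlt, hval ▸ hnm, fun j hj hjle => hval ▸ hmax j (by omega) hj hjle,
        fun j hj => hval ▸ hfirst j hj⟩

theorem getD_mem {array : List Int} {j : Nat} (hj : j < array.length) :
    array.getD j 0 ∈ array := by
  rw [List.getD_eq_getElem array 0 hj]
  exact List.getElem_mem hj

theorem no_nonpos_filter_nil {array : List Int}
    (h : ∀ x ∈ array, ¬ x ≤ 0) : array.filter (fun x => decide (x ≤ 0)) = [] := by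
  simp only [List.filter_eq_nil_iff, decide_eq_true_eq]
  exact h

-- A returns none exactly when no element is ≤ 0
theorem a_none {array : List Int} (h : ∀ x ∈ array, ¬ x ≤ 0) :
    get_negative_max_or_zero_index_py array = none := by
  unfold get_negative_max_or_zero_index_py
  by_cases hlen : array.length = 0
  · simp [hlen]
  · simp only [hlen, if_false]
    cases hfind : pyA_find array 0 with
    | none => rfl
    | some i0 =>
      obtain ⟨h1, h2, _⟩ := find_some array array.length 0 i0 (by omega) hfind
      exact absurd h2 (by simpa using h _ (getD_mem h1))

theorem b_none {array : List Int} (h : ∀ x ∈ array, ¬ x ≤ 0) :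
    get_negative_max_or_zero_index_py_alt array = none := by
  unfold get_negative_max_or_zero_index_py_alt
  rw [no_nonpos_filter_nil h]
  simp [PySem.List.max?]

theorem a_good {array : List Int} (hx : ∃ x ∈ array, x ≤ 0) :
    ∃ r : Nat, get_negative_max_or_zero_index_py array = some (r : Int) ∧ GoodIdx array r := by
  unfold get_negative_max_or_zero_index_py
  obtain ⟨x, hxmem, hxle⟩ := hx
  have hlen : array.length ≠ 0 := by
    intro h0
    rw [List.length_eq_zero_iff] at h0
    subst h0; simp at hxmem
  simp only [hlen, if_false]
  cases hfind : pyA_find array 0 with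
  | none =>
    obtain ⟨j, hj, hjx⟩ := List.mem_iff_getElem.mp hxmem
    have := find_none array array.length 0 (by omega) hfind j (by omega) hj
    rw [List.getD_eq_getElem array 0 hj, hjx] at this
    omega
  | some i0 =>
    obtain ⟨h1, h2, h3⟩ := find_some array array.length 0 i0 (by omega) hfind
    refine ⟨pyA_scan array i0 (array.getD i0 0) i0, rfl, ?_⟩
    refine scan_good array array.length i0 (array.getD i0 0) i0 (by omega) h2 h1 rfl ?_ ?_
    · intro j hj hjl hjle
      have := h3 j (by omega) hj
      omega
    · intro j hj
      have := h3 j (by omega) hj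
      omega

theorem b_good {array : List Int} (hx : ∃ x ∈ array, x ≤ 0) :
    ∃ k : Nat, get_negative_max_or_zero_index_py_alt array = some (k : Int) ∧ GoodIdx array k := by
  unfold get_negative_max_or_zero_index_py_alt
  obtain ⟨x, hxmem, hxle⟩ := hx
  have hxf : x ∈ array.filter (fun x => decide (x ≤ 0)) := by
    simp [List.mem_filter, hxmem, hxle]
  cases hmax : PySem.List.max? (array.filter (fun x => decide (x ≤ 0))) (fun y => y) with
  | none =>
    rw [PySem.List.max?_eq_none_iff] at hmax
    rw [hmax] at hxf
    simp at hxf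
  | some m =>
    have hmmem : m ∈ array.filter (fun x => decide (x ≤ 0)) := PySem.List.max?_mem hmax
    have hmarr : m ∈ array := (List.mem_filter.mp hmmem).1
    have hmle : m ≤ 0 := by simpa using (List.mem_filter.mp hmmem).2
    have hmmax : ∀ y ∈ array, y ≤ 0 → y ≤ m := by
      intro y hy hyle
      exact PySem.List.max?_isMax hmax y (by simp [List.mem_filter, hy, hyle])
    cases hidx : PySem.List.index? array m with
    | none =>
      rw [PySem.List.index?_eq_none_iff] at hidx
      exact absurd hmarr hidx
    | some k =>
      obtain ⟨hk, hkv, hkfirst⟩ := PySem.List.getElem_of_index?_eq_some hidx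
      refine ⟨k, ?_, ⟨hk, ?_, ?_, ?_⟩⟩
      · simp only [hmax]
        rw [PySem.List.index?_eq_idxOf?] at hidx
        simp [hidx]
      · rw [List.getD_eq_getElem array 0 hk, hkv]; exact hmle
      · intro j hj hjle
        rw [List.getD_eq_getElem array 0 hk, hkv]
        rw [List.getD_eq_getElem array 0 hj] at hjle ⊢
        exact hmmax _ (List.getElem_mem hj) hjle
      · intro j hj
        have hjlen : j < array.length := by omega
        rw [List.getD_eq_getElem array 0 hk, hkv, List.getD_eq_getElem array 0 hjlen]
        exact hkfirst j hj

-- ===== VERDICT (by name: the statement is the Claim_ definition above) =====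
theorem get_negative_max_or_zero_index_py_spec : Claim_equal_get_negative_max_or_zero_index_py := by
  intro array _
  unfold Spec_get_negative_max_or_zero_index_py
  by_cases hx : ∃ x ∈ array, x ≤ 0
  · obtain ⟨r, har, hrg⟩ := a_good hx
    obtain ⟨k, hbk, hkg⟩ := b_good hx
    rw [har, hbk, good_unique hrg hkg]
  · push_neg at hx
    rw [a_none (fun x hxm => not_le.mpr (hx x hxm)), b_none (fun x hxm => not_le.mpr (hx x hxm))]
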